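-- pv_equiv track=rewrite | github.com/alen25ra293-coder/tech-8ytees-automation | src/generators/idea_bank.py | _is_used
-- ===== SOURCE A (Python) =====
-- def _is_used(topic: str, used_list: list) -> bool:
--     """Fuzzy-match: checks if any 4-word substring of topic is already used."""
--     used_set = set(used_list)
--     t = topic.strip().lower()
--     if t in used_set:
--         return True
--     words = t.split()
--     for i in range(len(words) - 3):
--         chunk = " ".join(words[i:i+4])
--         if any(chunk in u for u in used_set):
--             return True
--     return False
-- ===== SOURCE B (Python) =====
-- def _is_used(topic: str, used_list: list) -> bool:
--     """Fuzzy-match: checks if any 4-word substring of topic is already used."""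
--     t = topic.strip().lower()
--     words = t.split()
--     # Multi-pattern search, Rabin-Karp style: hash every 4-word chunk into a
--     # set once, then scan each used string position by position, probing its
--     # fixed-length windows against the chunk set instead of running one
--     # substring search per (chunk, used-string) pair.
--     chunks = set()
--     for i in range(len(words) - 3):
--         chunks.add(" ".join(words[i:i+4]))
--     lens = {len(c) for c in chunks}
--     for u in used_list:
--         if u == t:
--             return True
--         for L in lens:
--             for j in range(len(u) - L + 1):
--                 if u[j:j+L] in chunks:
--                     return True
--     return False
-- ===== Notes on version B (the rewrite author's own statement) =====
-- stated objective: alternative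
-- what changed: B inverts the search: instead of running one substring search per (chunk, used-string) pair as A does, it hashes all 4-word chunks into a set (plus the set of their lengths) once and then scans each used string position by position, probing each fixed-length window u[j:j+L] against the chunk set (Rabin-Karp-style multi-pattern matching, text-driven instead of pattern-driven).
import Mathlib
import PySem

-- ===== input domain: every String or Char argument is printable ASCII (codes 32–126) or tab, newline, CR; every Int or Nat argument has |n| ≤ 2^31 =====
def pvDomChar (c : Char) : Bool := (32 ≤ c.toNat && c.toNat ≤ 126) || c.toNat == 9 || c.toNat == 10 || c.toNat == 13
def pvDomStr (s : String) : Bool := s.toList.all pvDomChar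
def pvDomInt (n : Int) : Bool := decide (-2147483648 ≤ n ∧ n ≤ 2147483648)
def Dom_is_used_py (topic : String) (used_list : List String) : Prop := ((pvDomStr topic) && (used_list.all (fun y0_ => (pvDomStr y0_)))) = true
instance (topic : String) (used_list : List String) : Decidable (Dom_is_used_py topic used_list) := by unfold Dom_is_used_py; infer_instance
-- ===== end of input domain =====

-- B replaces A's per-(chunk, used-string) substring searches by a multi-pattern scan:
-- it hashes all 4-word chunks into a set once and probes each used string's fixed-length
-- windows against that set (text-position-driven, Rabin-Karp style); objective: alternative.

-- ===== PORT A =====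
def is_used_py (topic : String) (used_list : List String) : Bool :=
  let used_set := PySem.Set.ofList used_list
  let t := PySem.Str.lower (PySem.Str.strip topic)
  if used_set.contains t then true
  else
    let words := PySem.Str.split₀ t
    -- 'for i in range(len(words)-3): if any(chunk in u for u in used_set): return True / return False'
    (PySem.List.pyRange 0 ((words.length : Int) - 3) 1).any (fun i =>
      let chunk := PySem.Str.join " " (PySem.List.slice words (some i) (some (i + 4)))
      used_set.any (fun u => PySem.Str.isIn chunk u))

-- ===== PORT B =====
def is_used_py_alt (topic : String) (used_list : List String) : Bool :=
  let t := PySem.Str.lower (PySem.Str.strip topic)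
  let words := PySem.Str.split₀ t
  -- chunks = set(); for i in range(len(words)-3): chunks.add(" ".join(words[i:i+4]))
  let chunks : PySem.Set String :=
    (PySem.List.pyRange 0 ((words.length : Int) - 3) 1).foldl
      (fun s i => s.add (PySem.Str.join " " (PySem.List.slice words (some i) (some (i + 4)))))
      PySem.Set.empty
  -- lens = {len(c) for c in chunks}  (result below is order-independent: boolean any)
  let lens : PySem.Set Int := PySem.Set.ofList (chunks.map (fun c => PySem.Str.len c))
  -- for u in used_list: if u == t: return True; for L in lens: for j in range(len(u)-L+1): …
  used_list.any (fun u =>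
    u == t ||
    lens.any (fun L =>
      (PySem.List.pyRange 0 (PySem.Str.len u - L + 1) 1).any (fun j =>
        chunks.contains (PySem.Str.slice u (some j) (some (j + L))))))

-- ===== PRECONDITION & SPEC =====
def Spec_is_used_py (topic : String) (used_list : List String) (out : Bool) : Prop := out = is_used_py_alt topic used_list
instance (topic : String) (used_list : List String) (out : Bool) : Decidable (Spec_is_used_py topic used_list out) := by unfold Spec_is_used_py; infer_instance

-- ===== CLAIM (what is proved, stated in full; the proofs are below) =====
def Claim_equal_is_used_py : Prop := ∀ (topic : String) (used_list : List String), Dom_is_used_py topic used_list → Spec_is_used_py topic used_list (is_used_py topic used_list)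

-- ===== LEMMAS AND PROOFS =====

-- membership test on a Python set built from a list = membership test on the list
theorem contains_ofList_eq {α : Type} [BEq α] [LawfulBEq α] (l : List α) (x : α) :
    (PySem.Set.ofList l).contains x = l.contains x := by
  rw [Bool.eq_iff_iff, PySem.Set.contains_iff, PySem.Set.mem_ofList, List.contains_iff_mem]

-- 'sub in u' ⟺ some window u[j:j+len(sub)] with j in range(len(u)-len(sub)+1) equals sub
theorem isIn_iff_exists_slice (c u : String) :
    PySem.Str.isIn c u = true ↔
      ∃ j, j ∈ PySem.List.pyRange 0 (PySem.Str.len u - PySem.Str.len c + 1) 1 ∧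
        PySem.Str.slice u (some j) (some (j + PySem.Str.len c)) = c := by
  rw [PySem.Str.isIn_iff_infix, PySem.Str.len_eq, PySem.Str.len_eq]
  constructor
  · rintro ⟨s, t', hst⟩
    have hlen := congrArg List.length hst
    simp only [List.length_append] at hlen
    refine ⟨(s.length : Int), ?_, ?_⟩
    · rw [PySem.List.mem_pyRange_one]
      exact ⟨Int.natCast_nonneg _, by omega⟩
    · apply String.toList_inj.mp
      rw [PySem.Str.toList_slice, PySem.Chars.slice_eq_listSlice,
        PySem.List.slice_natCast_add, ← hst, List.append_assoc, List.drop_left,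
        List.take_left]
  · rintro ⟨j, hj, hsl⟩
    rw [PySem.List.mem_pyRange_one] at hj
    obtain ⟨k, rfl⟩ : ∃ k : ℕ, (k : Int) = j := ⟨j.toNat, Int.toNat_of_nonneg hj.1⟩
    have hsl' : (u.toList.drop k).take c.toList.length = c.toList := by
      have := congrArg String.toList hsl
      rwa [PySem.Str.toList_slice, PySem.Chars.slice_eq_listSlice,
        PySem.List.slice_natCast_add] at this
    refine ⟨u.toList.take k, (u.toList.drop k).drop c.toList.length, ?_⟩
    have h2 : c.toList ++ (u.toList.drop k).drop c.toList.length = u.toList.drop k := by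
      nth_rewrite 1 [← hsl']
      exact List.take_append_drop _ _
    rw [List.append_assoc, h2, List.take_append_drop]

-- any window u[j:j+L] with 0 ≤ j, 0 ≤ L is a substring of u
theorem slice_isIn (u : String) (j L : Int) (hj : 0 ≤ j) (hL : 0 ≤ L) :
    PySem.Str.isIn (PySem.Str.slice u (some j) (some (j + L))) u = true := by
  rw [PySem.Str.isIn_iff_infix, PySem.Str.toList_slice, PySem.Chars.slice_eq_listSlice,
    PySem.List.slice_toNat u.toList hj (by omega : (0:Int) ≤ j + L)]
  exact ((List.take_prefix _ _).isInfix).trans (List.drop_suffix _ _).isInfix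

-- building a set by repeated .add in a loop = the set of the mapped list
theorem fold_add_eq_ofList {α : Type} [BEq α] {β : Type} (l : List β) (f : β → α) :
    l.foldl (fun s b => PySem.Set.add s (f b)) PySem.Set.empty
      = PySem.Set.ofList (l.map f) := by
  rw [← PySem.Set.update_map_eq_foldl_add, PySem.Set.update_empty]

-- the position-driven probe of every fixed-length window finds exactly the chunks that 'in' finds
theorem scan_iff (C : List String) (u : String) :
    (∃ L ∈ C.map PySem.Str.len, ∃ j ∈ PySem.List.pyRange 0 (PySem.Str.len u - L + 1) 1,
        PySem.Str.slice u (some j) (some (j + L)) ∈ C)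
    ↔ ∃ c ∈ C, PySem.Str.isIn c u = true := by
  constructor
  · rintro ⟨L, hL, j, hj, hmem⟩
    rcases List.mem_map.mp hL with ⟨c0, -, rfl⟩
    have hL0 : 0 ≤ PySem.Str.len c0 := by rw [PySem.Str.len_eq]; exact Int.natCast_nonneg _
    have hj0 : 0 ≤ j := ((PySem.List.mem_pyRange_one).mp hj).1
    exact ⟨_, hmem, slice_isIn u j _ hj0 hL0⟩
  · rintro ⟨c, hc, hin⟩
    rcases (isIn_iff_exists_slice c u).mp hin with ⟨j, hj, hsl⟩
    exact ⟨PySem.Str.len c, List.mem_map_of_mem hc, j, hj, by rw [hsl]; exact hc⟩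

-- A's pattern-driven search = B's window-probing scan, for any pattern family f over index list R
theorem main_eq (t : String) (used_list : List String) (R : List Int) (f : Int → String) :
    (if (PySem.Set.ofList used_list).contains t then true
     else R.any (fun i => (PySem.Set.ofList used_list).any (fun u => PySem.Str.isIn (f i) u)))
    = used_list.any (fun u =>
        u == t ||
        (PySem.Set.ofList ((PySem.Set.ofList (R.map f)).map (fun c => PySem.Str.len c))).any
          (fun L => (PySem.List.pyRange 0 (PySem.Str.len u - L + 1) 1).any (fun j =>
            (PySem.Set.ofList (R.map f)).contains
              (PySem.Str.slice u (some j) (some (j + L))))) ) := by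
  rw [contains_ofList_eq]
  by_cases hmem : used_list.contains t = true
  · simp only [hmem, if_true]
    symm
    rw [List.any_eq_true]
    exact ⟨t, List.contains_iff_mem.mp hmem, by simp⟩
  · simp only [Bool.not_eq_true] at hmem
    simp only [hmem, Bool.false_eq_true, if_false]
    have hnot : t ∉ used_list := by
      rw [← List.contains_iff_mem, hmem]; exact Bool.false_ne_true
    rw [Bool.eq_iff_iff]
    simp only [List.any_eq_true, Bool.or_eq_true, beq_iff_eq,
      PySem.Set.contains_iff, PySem.Set.mem_ofList]
    constructor
    · rintro ⟨i, hi, u, hu, hin⟩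
      refine ⟨u, hu, Or.inr ?_⟩
      rcases (scan_iff (R.map f) u).mpr ⟨f i, List.mem_map_of_mem hi, hin⟩
        with ⟨L, hL, j, hj, hsl⟩
      rcases List.mem_map.mp hL with ⟨c0, hc0, rfl⟩
      exact ⟨PySem.Str.len c0,
        List.mem_map.mpr ⟨c0, (PySem.Set.mem_ofList _ _).mpr hc0, rfl⟩, j, hj, hsl⟩
    · rintro ⟨u, hu, h | ⟨L, hL, j, hj, hsl⟩⟩
      · exact absurd (h ▸ hu) hnot
      · rcases List.mem_map.mp hL with ⟨c0, hc0, rfl⟩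
        rcases (scan_iff (R.map f) u).mp
          ⟨PySem.Str.len c0,
            List.mem_map_of_mem ((PySem.Set.mem_ofList _ _).mp hc0), j, hj, hsl⟩
          with ⟨c, hc, hin⟩
        rcases List.mem_map.mp hc with ⟨i, hi, rfl⟩
        exact ⟨i, hi, u, hu, hin⟩

-- ===== VERDICT (by name: the statement is the Claim_ definition above) =====
theorem is_used_py_spec : Claim_equal_is_used_py := by
  intro topic used_list _
  unfold Spec_is_used_py is_used_py is_used_py_alt
  dsimp only
  rw [fold_add_eq_ofList (PySem.List.pyRange 0
      (((PySem.Str.split₀ (PySem.Str.lower (PySem.Str.strip topic))).length : Int) - 3) 1)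
    (fun i => PySem.Str.join " " (PySem.List.slice
      (PySem.Str.split₀ (PySem.Str.lower (PySem.Str.strip topic))) (some i) (some (i + 4))))]
  exact main_eq (PySem.Str.lower (PySem.Str.strip topic)) used_list _ _
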